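-- pv_equiv track=rewrite | github.com/makwingchi/info-aggregator | dunks_report.py | calc_biggest_run
-- ===== SOURCE A (Python) =====
-- from typing import Any, Dict, Iterable, List, Optional, Tuple
--
-- def calc_biggest_run(pbp: List[Dict[str, Any]]) -> Tuple[int, Optional[int]]:
--     # Identify the largest continuous scoring run by a single team.
--     current_team = None
--     current_pts = 0
--     best_pts = 0
--     best_team = None
--     for ev in pbp:
--         pts = ev.get("pts")
--         if not pts:
--             continue
--         team_id = ev.get("off_team_id")
--         if team_id is None:
--             continue
--         if team_id != current_team:
--             current_team = team_id
--             current_pts = 0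
--         current_pts += pts
--         if current_pts > best_pts:
--             best_pts = current_pts
--             best_team = team_id
--     return best_pts, best_team
-- ===== SOURCE B (Python) =====
-- from itertools import accumulate, groupby
--
-- def calc_biggest_run(pbp):
--     # Identify the largest continuous scoring run by a single team.
--     # Declarative staging: filter to a (team, pts) stream, group it into
--     # maximal same-team runs, reduce each run to its maximum prefix sum,
--     # then take the global maximum and the first run achieving it.
--     stream = [(ev["off_team_id"], ev["pts"]) for ev in pbp
--               if ev.get("pts") and ev.get("off_team_id") is not None]
--     runs = [(team, max(accumulate(p for _, p in grp)))
--             for team, grp in groupby(stream, key=lambda tp: tp[0])]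
--     best_pts = max((m for _, m in runs), default=0)
--     if best_pts <= 0:
--         return 0, None
--     best_team = next(team for team, m in runs if m == best_pts)
--     return best_pts, best_team
-- ===== Notes on version B (the rewrite author's own statement) =====
-- stated objective: alternative
-- what changed: Replaces A's single stateful scan (current-team/current-points registers reset on team change, best updated inline) with a declarative pipeline: filter events to a (team, pts) stream, group it with itertools.groupby into maximal same-team runs, reduce each run to its maximum prefix sum via accumulate, then take the global maximum of these run values and the first run achieving it.
import Mathlib
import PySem

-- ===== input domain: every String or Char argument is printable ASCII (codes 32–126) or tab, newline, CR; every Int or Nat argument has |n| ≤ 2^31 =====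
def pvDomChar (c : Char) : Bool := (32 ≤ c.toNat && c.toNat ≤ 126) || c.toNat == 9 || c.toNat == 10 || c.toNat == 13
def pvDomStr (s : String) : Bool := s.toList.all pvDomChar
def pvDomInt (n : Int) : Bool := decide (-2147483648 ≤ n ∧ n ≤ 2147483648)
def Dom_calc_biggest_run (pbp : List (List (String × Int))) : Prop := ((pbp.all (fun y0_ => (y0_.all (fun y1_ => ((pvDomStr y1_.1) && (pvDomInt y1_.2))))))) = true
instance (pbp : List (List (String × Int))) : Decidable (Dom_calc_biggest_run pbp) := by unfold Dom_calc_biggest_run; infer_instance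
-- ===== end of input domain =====

-- B replaces A's single stateful scan with a declarative staging (filter, group into maximal
-- same-team runs, per-run max prefix sum, global max + first achiever); same cost, alternative structure.

-- ===== PORT A =====
-- A-side helper: the body of A's for-loop
def calc_biggest_run_step (st : Option Int × Int × Int × Option Int)
    (ev : List (String × Int)) : Option Int × Int × Int × Option Int :=
  match (PySem.Dict.mk ev).get? "pts" with
  | none => st
  | some pts =>
    if pts = 0 then st
    else
      match (PySem.Dict.mk ev).get? "off_team_id" with
      | none => st
      | some team_id =>
        let (current_team, current_pts) :=
          if some team_id ≠ st.1 then (some team_id, (0 : Int)) else (st.1, st.2.1)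
        let current_pts := current_pts + pts
        if current_pts > st.2.2.1 then (current_team, current_pts, current_pts, some team_id)
        else (current_team, current_pts, st.2.2.1, st.2.2.2)

def calc_biggest_run (pbp : List (List (String × Int))) : Int × Option Int :=
  let st := pbp.foldl calc_biggest_run_step (none, 0, 0, none)
  (st.2.2.1, st.2.2.2)

-- ===== PORT B =====
-- B-side helper: the filtering comprehension's per-event test → the (team, pts) pair
def pvEvent? (ev : List (String × Int)) : Option (Int × Int) :=
  match (PySem.Dict.mk ev).get? "pts" with
  | none => none
  | some pts =>
    if pts = 0 then none
    else
      match (PySem.Dict.mk ev).get? "off_team_id" with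
      | none => none
      | some tid => some (tid, pts)

-- exact model of itertools.groupby keyed on the first component: maximal runs of equal team
def pvGroupBy : List (Int × Int) → List (Int × List Int)
  | [] => []
  | (t, p) :: rest =>
      (t, p :: (rest.takeWhile (fun tp => tp.1 == t)).map (·.2)) ::
      pvGroupBy (rest.dropWhile (fun tp => tp.1 == t))
termination_by l => l.length
decreasing_by exact Nat.lt_succ_of_le (List.length_dropWhile_le _ _)

-- max(accumulate(ps)): exact for the nonempty groups groupby produces
def pvMaxPref (ps : List Int) : Int :=
  ((ps.scanl (· + ·) 0).tail).max?.getD 0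

def calc_biggest_run_alt (pbp : List (List (String × Int))) : Int × Option Int :=
  let stream := pbp.filterMap pvEvent?
  let runs := (pvGroupBy stream).map (fun g => (g.1, pvMaxPref g.2))
  let best_pts := (runs.map (·.2)).max?.getD 0
  if best_pts ≤ 0 then (0, none)
  else (best_pts, (runs.find? (fun r => r.2 == best_pts)).map (·.1))

-- ===== PRECONDITION & SPEC =====
def Spec_calc_biggest_run (pbp : List (List (String × Int))) (out : Int × Option Int) : Prop := out = calc_biggest_run_alt pbp
instance (pbp : List (List (String × Int))) (out : Int × Option Int) : Decidable (Spec_calc_biggest_run pbp out) := by unfold Spec_calc_biggest_run; infer_instance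

-- ===== CLAIM (what is proved, stated in full; the proofs are below) =====
def Claim_equal_calc_biggest_run : Prop := ∀ (pbp : List (List (String × Int))), Dom_calc_biggest_run pbp → Spec_calc_biggest_run pbp (calc_biggest_run pbp)

-- ===== LEMMAS AND PROOFS =====

-- the per-scoring-event step of A, over the filtered (team, pts) stream
def pvStepA (st : Option Int × Int × Int × Option Int) (tp : Int × Int) :
    Option Int × Int × Int × Option Int :=
  let cp := (if some tp.1 ≠ st.1 then (0 : Int) else st.2.1) + tp.2
  if cp > st.2.2.1 then (some tp.1, cp, cp, some tp.1)
  else (some tp.1, cp, st.2.2.1, st.2.2.2)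

theorem pvStep_event (st : Option Int × Int × Int × Option Int) (ev : List (String × Int)) :
    calc_biggest_run_step st ev
      = match pvEvent? ev with
        | none => st
        | some x => pvStepA st x := by
  unfold calc_biggest_run_step pvEvent? pvStepA
  rcases h1 : (PySem.Dict.mk ev).get? "pts" with _ | pts
  · rfl
  · by_cases h2 : pts = 0
    · simp [h2]
    · rcases h3 : (PySem.Dict.mk ev).get? "off_team_id" with _ | tid
      · simp [h2]
      · simp [h2]
        split <;> split <;> simp_all

theorem pvFoldA_filter (pbp : List (List (String × Int))) :
    ∀ st : Option Int × Int × Int × Option Int,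
    pbp.foldl calc_biggest_run_step st = (pbp.filterMap pvEvent?).foldl pvStepA st := by
  induction pbp with
  | nil => intro st; simp
  | cons ev rest ih =>
    intro st
    rw [List.foldl_cons, List.filterMap_cons, pvStep_event]
    rcases h1 : pvEvent? ev with _ | x <;> simp [ih]

-- step of A restricted to a segment whose team is the current team t
def pvSegStep (t : Int) (st : Int × Int × Option Int) (p : Int) : Int × Int × Option Int :=
  let s := st.1 + p
  if s > st.2.1 then (s, s, some t) else (s, st.2.1, st.2.2)

-- max of the running sums s+p1, s+p1+p2, … (pvMP s [] = s, degenerate, only used via nonempty lists)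
def pvMP : Int → List Int → Int
  | s, [] => s
  | s, p :: r => max (s + p) (pvMP (s + p) r)

-- the per-run reducer of B's fold-of-runs reformulation
def pvStep2 (bb : Int × Option Int) (r : Int × Int) : Int × Option Int :=
  (max bb.1 r.2, if r.2 > bb.1 then some r.1 else bb.2)

theorem pvScanl_foldl_max : ∀ (r : List Int) (s a : Int),
    (List.scanl (· + ·) s r).foldl max a = max a (max s (pvMP s r)) := by
  intro r
  induction r with
  | nil => intro s a; simp [pvMP, List.scanl]
  | cons p rest ih =>
    intro s a
    rw [List.scanl_cons, List.foldl_cons, ih]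
    simp only [pvMP]
    omega

theorem pvScanl_max? (r : List Int) (s : Int) :
    (List.scanl (· + ·) s r).max? = some (max s (pvMP s r)) := by
  cases r with
  | nil => simp [pvMP, List.scanl, List.max?]
  | cons p rest =>
    rw [List.scanl_cons]
    simp only [List.max?, pvMP]
    rw [pvScanl_foldl_max]

theorem pvMaxPref_cons (p : Int) (ps : List Int) :
    pvMaxPref (p :: ps) = pvMP 0 (p :: ps) := by
  unfold pvMaxPref
  rw [List.scanl_cons, List.tail_cons, pvScanl_max?]
  simp [pvMP]

theorem pvSeg_fold (t : Int) : ∀ (ps : List Int) (s b : Int) (bt : Option Int),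
    (ps.map (fun p => (t, p))).foldl pvStepA (some t, s, b, bt)
      = (some t, ps.foldl (pvSegStep t) (s, b, bt)) := by
  intro ps
  induction ps with
  | nil => intro s b bt; rfl
  | cons p rest ih =>
    intro s b bt
    rw [List.map_cons, List.foldl_cons, List.foldl_cons]
    have h : pvStepA (some t, s, b, bt) (t, p) = (some t, pvSegStep t (s, b, bt) p) := by
      simp only [pvStepA, pvSegStep]
      split <;> split <;> simp_all
    rw [h, ih]

theorem pvSeg_val (t : Int) : ∀ (ps : List Int) (p s b : Int) (bt : Option Int),
    ((p :: ps).foldl (pvSegStep t) (s, b, bt)).2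
      = (max b (pvMP s (p :: ps)), if pvMP s (p :: ps) > b then some t else bt) := by
  intro ps
  induction ps with
  | nil =>
    intro p s b bt
    simp only [List.foldl_cons, List.foldl_nil, pvSegStep, pvMP]
    split_ifs <;> simp_all <;> omega
  | cons q qs ih =>
    intro p s b bt
    rw [List.foldl_cons]
    have h : pvSegStep t (s, b, bt) p
        = (s + p, max b (s + p), if s + p > b then some t else bt) := by
      simp only [pvSegStep]
      split_ifs <;> simp_all
      omega
    rw [h, ih]
    simp only [pvMP, Prod.mk.injEq]
    refine ⟨by omega, ?_⟩
    split_ifs <;> first | rfl | omega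

-- every element of this takeWhile has first component t
theorem pvTakeWhile_shape (t : Int) : ∀ (l : List (Int × Int)),
    l.takeWhile (fun tp => tp.1 == t)
      = ((l.takeWhile (fun tp => tp.1 == t)).map (·.2)).map (fun p => (t, p)) := by
  intro l
  induction l with
  | nil => rfl
  | cons hd tl ih =>
    obtain ⟨a, q⟩ := hd
    by_cases h : a = t
    · subst h
      rw [List.takeWhile_cons_of_pos (by simp)]
      simp only [List.map_cons]
      rw [← ih]
    · rw [List.takeWhile_cons_of_neg (by simp [h])]
      rfl

theorem pvHead_dropWhile (p : Int × Int → Bool) :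
    ∀ (l : List (Int × Int)) (u : Int × Int), (l.dropWhile p).head? = some u → p u = false := by
  intro l
  induction l with
  | nil => intro u h; simp at h
  | cons a l ih =>
    intro u h
    rw [List.dropWhile_cons] at h
    split at h
    · exact ih u h
    · rw [List.head?_cons] at h
      injection h with h'
      subst h'
      simpa using ‹¬ p a = true›

theorem pvG : ∀ (stream : List (Int × Int)) (ct : Option Int) (s b : Int) (bt : Option Int),
    (∀ u ∈ stream.head?, ct ≠ some u.1) →
    (stream.foldl pvStepA (ct, s, b, bt)).2.2
      = ((pvGroupBy stream).map (fun g => (g.1, pvMaxPref g.2))).foldl pvStep2 (b, bt)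
  | [], _, _, _, _, _ => by simp [pvGroupBy]
  | (t, p) :: rest, ct, s, b, bt, hct => by
    have hne : ct ≠ some t := hct (t, p) (by simp)
    rw [pvGroupBy]
    set tw := rest.takeWhile (fun tp => tp.1 == t) with htw
    set dw := rest.dropWhile (fun tp => tp.1 == t) with hdw
    have hsplit : rest = tw ++ dw := (List.takeWhile_append_dropWhile).symm
    rw [List.foldl_cons]
    have h1 : pvStepA (ct, s, b, bt) (t, p) = (some t, pvSegStep t (0, b, bt) p) := by
      simp only [pvStepA, pvSegStep]
      have : some t ≠ ct := fun h => hne h.symm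
      rw [if_pos this]
      split <;> rfl
    rw [h1, hsplit, List.foldl_append]
    have h2 : tw.foldl pvStepA (some t, pvSegStep t (0, b, bt) p)
        = (some t, (p :: tw.map (·.2)).foldl (pvSegStep t) (0, b, bt)) := by
      rw [htw]
      conv_lhs => rw [pvTakeWhile_shape t rest]
      rw [pvSeg_fold]
      rfl
    rw [h2]
    have h3 := pvSeg_val t (tw.map (·.2)) p 0 b bt
    have h4 : ∀ u ∈ dw.head?, (some t : Option Int) ≠ some u.1 := by
      intro u hu h
      have hfalse : (fun tp : Int × Int => tp.1 == t) u = false := by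
        apply pvHead_dropWhile (fun tp : Int × Int => tp.1 == t) rest u
        rw [← hdw]
        exact hu
      simp only [beq_eq_false_iff_ne, ne_eq] at hfalse
      injection h with h'
      exact hfalse h'.symm
    have h5 := pvG dw (some t) ((p :: tw.map (·.2)).foldl (pvSegStep t) (0, b, bt)).1 (max b (pvMP 0 (p :: tw.map (·.2)))) (if pvMP 0 (p :: tw.map (·.2)) > b then some t else bt) h4
    have h6 : ((p :: tw.map (·.2)).foldl (pvSegStep t) (0, b, bt))
        = (((p :: tw.map (·.2)).foldl (pvSegStep t) (0, b, bt)).1,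
           max b (pvMP 0 (p :: tw.map (·.2))), if pvMP 0 (p :: tw.map (·.2)) > b then some t else bt) := by
      rw [← h3]
    rw [h6, h5]
    rw [List.map_cons, List.foldl_cons]
    congr 1
    simp only [pvStep2, pvMaxPref_cons]
  termination_by stream => stream.length
  decreasing_by
    simp only [List.length_cons]
    exact Nat.lt_succ_of_le (List.length_dropWhile_le _ _)

theorem pvFoldl_max_max : ∀ (l : List Int) (a c : Int),
    l.foldl max (max a c) = max a (l.foldl max c) := by
  intro l
  induction l with
  | nil => intro a c; rfl
  | cons x xs ih =>
    intro a c
    simp only [List.foldl_cons]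
    rw [← ih]
    congr 1
    omega

theorem pvFoldMax (ms : List Int) (b : Int) : ms.foldl max b = max b (ms.max?.getD b) := by
  cases ms with
  | nil =>
    show b = max b b
    omega
  | cons q qs =>
    have h : (q :: qs).max? = some (qs.foldl max q) := rfl
    rw [h, Option.getD_some]
    exact pvFoldl_max_max qs b q

theorem pvP : ∀ (runs : List (Int × Int)) (b : Int) (bt : Option Int),
    runs.foldl pvStep2 (b, bt)
      = ((runs.map (·.2)).foldl max b,
         if (runs.map (·.2)).foldl max b > b
         then (runs.find? (fun r => r.2 == (runs.map (·.2)).foldl max b)).map (·.1)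
         else bt) := by
  intro runs
  induction runs with
  | nil => intro b bt; simp
  | cons hd rest ih =>
    intro b bt
    obtain ⟨t, m⟩ := hd
    rw [List.foldl_cons, List.map_cons, List.foldl_cons]
    have hstep : pvStep2 (b, bt) (t, m) = (max b m, if m > b then some t else bt) := rfl
    rw [hstep, ih]
    set M := (rest.map (·.2)).foldl max (max b m) with hM
    have hMge : max b m ≤ M := by
      rw [hM, pvFoldMax]
      omega
    by_cases hgt : M > max b m
    · have hmne : (m == M) = false := by
        simp only [beq_eq_false_iff_ne, ne_eq]
        omega
      rw [List.find?_cons_of_neg (by simp [hmne])]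
      have : M > b := by omega
      simp only [if_pos hgt, if_pos this]
    · have hMeq : M = max b m := by omega
      by_cases hmb : m > b
      · have : M = m := by omega
        rw [if_neg hgt, this]
        have hfind : List.find? (fun r => r.2 == m) ((t, m) :: rest) = some (t, m) :=
          List.find?_cons_of_pos (by simp)
        rw [hfind]
        simp [hmb]
      · have : M = b := by omega
        rw [if_neg hgt, this]
        simp [hmb]

-- ===== VERDICT (by name: the statement is the Claim_ definition above) =====
theorem calc_biggest_run_spec : Claim_equal_calc_biggest_run := by
  intro pbp _
  show calc_biggest_run pbp = calc_biggest_run_alt pbp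
  unfold calc_biggest_run calc_biggest_run_alt
  rw [pvFoldA_filter]
  set stream := pbp.filterMap pvEvent? with hstream
  set runs := (pvGroupBy stream).map (fun g => (g.1, pvMaxPref g.2)) with hruns
  have hG := pvG stream none 0 0 none (by intro u _ h; simp at h)
  rw [← hruns] at hG
  simp only [hG, pvP]
  set ms := runs.map (·.2) with hms
  rw [pvFoldMax]
  cases hmax : ms.max? with
  | none =>
    simp
  | some m =>
    rw [Option.getD_some]
    by_cases hm : m ≤ 0
    · have h1 : max (0 : Int) m = 0 := by omega
      simp [hm]
    · have h1 : max (0 : Int) m = m := by omega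
      have h2 : m > 0 := by omega
      simp only [h1, if_pos h2, if_neg (by omega : ¬ m ≤ 0)]
      rw [← hruns]
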